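-- pv_equiv track=rewrite | github.com/Marioshg/Pervasive_Computing_IMU_wearable_device | decision_tree_supervised.py | normalise_label
-- ===== SOURCE A (Python) =====
-- GESTURE_KEYWORDS = {
--     "look_left": ["look_left", "left", "behind_left"],
--     "look_right": ["look_right", "right", "behind_right"],
--     "look_up": ["look_up", "up"],
--     "look_down": ["look_down", "down"],
--     "tilt_left": ["tilt_left"],
--     "tilt_right": ["tilt_right"],
--     "nod": ["nod"],
--     "shake": ["shake"],
--     "idle": ["idle"],
--     "walk": ["walk"],
--     "jump": ["jump"],
--     "sit_down": ["sit", "sit_down"],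
--     "get_up": ["get_up", "stand", "stand_up"],
--     "music_beat": ["music_beat", "beat"],
--     "look_around": ["look_around", "around"],
--     "look_direction": ["look_direction", "direction"]
-- }
--
-- def normalise_label(label):
--     name = label.lower()
--
--     for true_label, keywords in GESTURE_KEYWORDS.items():
--         for kw in keywords:
--             if kw in name:
--                 if true_label in ["tilt_left","tilt_right","shake","music_beat","look_around","look_direction","nod"]:
--                     return "none"
--                 return true_label
--
--     return None  # unknown
-- ===== SOURCE B (Python) =====
-- # Different algorithm: instead of scanning the keyword table and running a substring
-- # search per keyword, walk the TEXT: for every start position of the lowered label,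
-- # prefix-match all table entries and keep the match of minimal table priority.
-- # The flat priority table bakes the fold-to-"none" decision into the data.
--
-- FLAT = [
--     ("look_left", "look_left"), ("left", "look_left"), ("behind_left", "look_left"),
--     ("look_right", "look_right"), ("right", "look_right"), ("behind_right", "look_right"),
--     ("look_up", "look_up"), ("up", "look_up"),
--     ("look_down", "look_down"), ("down", "look_down"),
--     ("tilt_left", "none"),
--     ("tilt_right", "none"),
--     ("nod", "none"),
--     ("shake", "none"),
--     ("idle", "idle"),
--     ("walk", "walk"),
--     ("jump", "jump"),
--     ("sit", "sit_down"), ("sit_down", "sit_down"),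
--     ("get_up", "get_up"), ("stand", "get_up"), ("stand_up", "get_up"),
--     ("music_beat", "none"), ("beat", "none"),
--     ("look_around", "none"), ("around", "none"),
--     ("look_direction", "none"), ("direction", "none"),
-- ]
--
-- def normalise_label(label):
--     name = label.lower()
--     best = None  # (priority, output) of the best match found so far
--     for i in range(len(name) + 1):
--         p = 0
--         for kw, out in FLAT:
--             if best is not None and best[0] <= p:
--                 break  # entries from here on can no longer beat the best match
--             if name.startswith(kw, i):
--                 best = (p, out)
--             p += 1
--     return best[1] if best is not None else None
-- ===== Notes on version B (the rewrite author's own statement) =====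
-- stated objective: alternative
-- what changed: Instead of scanning the keyword table and running a substring search for each keyword, B walks the text: for every start position of the lowered label it prefix-matches the entries of a flat priority table (the fold-to-none decision baked into the data), keeps the match of minimal priority and prunes entries that can no longer beat it, returning the best match's output.
import Mathlib
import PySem

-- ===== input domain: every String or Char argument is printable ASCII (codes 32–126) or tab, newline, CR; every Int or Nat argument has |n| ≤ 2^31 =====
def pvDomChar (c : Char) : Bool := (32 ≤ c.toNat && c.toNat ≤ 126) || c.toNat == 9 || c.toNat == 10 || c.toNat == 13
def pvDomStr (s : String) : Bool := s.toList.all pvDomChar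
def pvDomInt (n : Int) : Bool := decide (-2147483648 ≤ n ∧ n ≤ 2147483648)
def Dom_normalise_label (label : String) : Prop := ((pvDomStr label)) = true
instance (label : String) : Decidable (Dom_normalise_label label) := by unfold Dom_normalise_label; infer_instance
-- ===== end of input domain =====

-- B replaces A's keyword-table scan with per-keyword substring search by a text-driven
-- matcher: for each start position of the lowered label it prefix-matches a flat
-- priority table and keeps the minimal-priority match (objective: alternative).

-- ===== PORT A =====
def gestureKeywords : List (String × List String) :=
  [("look_left", ["look_left", "left", "behind_left"]),
   ("look_right", ["look_right", "right", "behind_right"]),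
   ("look_up", ["look_up", "up"]),
   ("look_down", ["look_down", "down"]),
   ("tilt_left", ["tilt_left"]),
   ("tilt_right", ["tilt_right"]),
   ("nod", ["nod"]),
   ("shake", ["shake"]),
   ("idle", ["idle"]),
   ("walk", ["walk"]),
   ("jump", ["jump"]),
   ("sit_down", ["sit", "sit_down"]),
   ("get_up", ["get_up", "stand", "stand_up"]),
   ("music_beat", ["music_beat", "beat"]),
   ("look_around", ["look_around", "around"]),
   ("look_direction", ["look_direction", "direction"])]

def foldedList : List String :=
  ["tilt_left", "tilt_right", "shake", "music_beat", "look_around", "look_direction", "nod"]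

def innerA (name trueLabel : String) : List String → Option String
  | [] => none
  | kw :: rest =>
    if PySem.Str.isIn kw name then
      if trueLabel ∈ foldedList then some "none" else some trueLabel
    else innerA name trueLabel rest

def outerA (name : String) : List (String × List String) → Option String
  | [] => none
  | (tl, kws) :: rest =>
    match innerA name tl kws with
    | some r => some r
    | none => outerA name rest

def normalise_label (label : String) : Option String :=
  outerA (PySem.Str.lower label) gestureKeywords

-- ===== PORT B =====
-- the flat priority table FLAT from Source B, a literal
def flatTable : List (String × String) :=
  [("look_left", "look_left"), ("left", "look_left"), ("behind_left", "look_left"),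
   ("look_right", "look_right"), ("right", "look_right"), ("behind_right", "look_right"),
   ("look_up", "look_up"), ("up", "look_up"),
   ("look_down", "look_down"), ("down", "look_down"),
   ("tilt_left", "none"),
   ("tilt_right", "none"),
   ("nod", "none"),
   ("shake", "none"),
   ("idle", "idle"),
   ("walk", "walk"),
   ("jump", "jump"),
   ("sit", "sit_down"), ("sit_down", "sit_down"),
   ("get_up", "get_up"), ("stand", "get_up"), ("stand_up", "get_up"),
   ("music_beat", "none"), ("beat", "none"),
   ("look_around", "none"), ("around", "none"),
   ("look_direction", "none"), ("direction", "none")]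

-- hand-port of Python's str.startswith(prefix, start): exact, because Python reads
-- the start argument with slice-bound semantics, i.e. s.startswith(p, i) == s[i:].startswith(p)
def pyStartswithFrom (s p : String) (i : Int) : Bool :=
  PySem.Str.startswith (PySem.Str.slice s (some i) none) p

-- the inner loop of Source B: counter p over FLAT with the early break, updating the best
def innerB (name : String) (i : Int) (s : Option (Nat × String) × Nat) :
    List (String × String) → Option (Nat × String) × Nat
  | [] => s
  | e :: rest =>
    if (match s.1 with | none => false | some b => decide (b.1 ≤ s.2)) = true then s
    else innerB name i
      (if pyStartswithFrom name e.1 i then (some (s.2, e.2), s.2 + 1) else (s.1, s.2 + 1)) rest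

def normalise_label_alt (label : String) : Option String :=
  let name := PySem.Str.lower label
  let best := (PySem.List.pyRange 0 (PySem.Str.len name + 1) 1).foldl
    (fun best i => (innerB name i (best, 0) flatTable).1)
    none
  match best with
  | none => none
  | some b => some b.2

-- ===== PRECONDITION & SPEC =====
def Spec_normalise_label (label : String) (out : Option String) : Prop := out = normalise_label_alt label
instance (label : String) (out : Option String) : Decidable (Spec_normalise_label label out) := by unfold Spec_normalise_label; infer_instance

-- ===== CLAIM (what is proved, stated in full; the proofs are below) =====
def Claim_equal_normalise_label : Prop := ∀ (label : String), Dom_normalise_label label → Spec_normalise_label label (normalise_label label)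

-- ===== LEMMAS AND PROOFS =====

-- first (priority, output) from counter k whose entry satisfies pred
def firstG (pred : String × String → Bool) : Nat → List (String × String) → Option (Nat × String)
  | _, [] => none
  | k, e :: rest => if pred e then some (k, e.2) else firstG pred (k + 1) rest

-- merge a previous best with a newly found match, keeping the smaller priority (ties keep the old)
def minp (b m : Option (Nat × String)) : Option (Nat × String) :=
  match m with
  | none => b
  | some p => match b with
    | none => some p
    | some q => if p.1 < q.1 then some p else b

-- first output whose entry satisfies pred (the common spec of both programs)
def firstOut (pred : String × String → Bool) : List (String × String) → Option String
  | [] => none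
  | e :: rest => if pred e then some e.2 else firstOut pred rest

theorem firstG_index_ge (pred : String × String → Bool) (l : List (String × String))
    (k : Nat) (q : Nat × String) (h : firstG pred k l = some q) : k ≤ q.1 := by
  induction l generalizing k with
  | nil => simp [firstG] at h
  | cons e rest ih =>
    simp only [firstG] at h
    split at h
    · cases h; simp
    · exact Nat.le_of_succ_le (ih (k + 1) h)

theorem firstG_false (l : List (String × String)) (k : Nat) :
    firstG (fun _ => false) k l = none := by
  induction l generalizing k with
  | nil => rfl
  | cons e rest ih => simp [firstG, ih]

-- a previous best with priority ≤ k beats any match found from counter k on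
theorem minp_stale (pred : String × String → Bool) (rest : List (String × String))
    (q : Nat × String) (k : Nat) (hq : q.1 ≤ k) :
    minp (some q) (firstG pred k rest) = some q := by
  cases hrest : firstG pred k rest with
  | none => rfl
  | some r =>
    have := firstG_index_ge _ _ _ _ hrest
    simp [minp, show ¬ r.1 < q.1 by omega]

-- a match at counter k beats any previous best found from counter k+1 on
theorem minp_fresh (pred : String × String → Bool) (rest : List (String × String))
    (o : String) (k : Nat) :
    minp (firstG pred (k + 1) rest) (some (k, o)) = some (k, o) := by
  cases hrest : firstG pred (k + 1) rest with
  | none => rfl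
  | some r =>
    have := firstG_index_ge _ _ _ _ hrest
    simp [minp, show k < r.1 by omega]

-- the inner loop computes minp of the incoming best and the first match from counter k
theorem innerB_eq_minp (name : String) (i : Int) (l : List (String × String))
    (b : Option (Nat × String)) (k : Nat) :
    (innerB name i (b, k) l).1 =
      minp b (firstG (fun e => pyStartswithFrom name e.1 i) k l) := by
  induction l generalizing b k with
  | nil => cases b <;> rfl
  | cons e rest ih =>
    simp only [innerB]
    cases b with
    | none =>
      rw [if_neg (by simp)]
      by_cases hm : pyStartswithFrom name e.1 i = true
      · rw [if_pos hm, ih, minp_stale _ _ _ _ (Nat.le_succ k)]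
        simp only [firstG]
        rw [if_pos hm]
        rfl
      · rw [if_neg hm, ih]
        simp only [firstG]
        rw [if_neg hm]
    | some q =>
      by_cases hbr : q.1 ≤ k
      · rw [if_pos (by simp [hbr])]
        exact (minp_stale _ _ _ _ hbr).symm
      · rw [if_neg (by simp [hbr])]
        by_cases hm : pyStartswithFrom name e.1 i = true
        · rw [if_pos hm, ih, minp_stale _ _ _ _ (Nat.le_succ k)]
          simp only [firstG]
          rw [if_pos hm]
          simp [minp, show k < q.1 by omega]
        · rw [if_neg hm, ih]
          simp only [firstG]
          rw [if_neg hm]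

-- minp of two first-matches is the first match of the disjunction
theorem minp_firstG_firstG (p q : String × String → Bool) (l : List (String × String)) (k : Nat) :
    minp (firstG p k l) (firstG q k l) = firstG (fun e => p e || q e) k l := by
  induction l generalizing k with
  | nil => rfl
  | cons e rest ih =>
    simp only [firstG]
    by_cases hp : p e = true
    · by_cases hq : q e = true
      · rw [if_pos hp, if_pos hq, if_pos (show (p e || q e) = true by simp [hp])]
        simp [minp]
      · rw [if_pos hp, if_neg hq, if_pos (show (p e || q e) = true by simp [hp])]
        exact minp_stale _ _ _ _ (Nat.le_succ k)
    · by_cases hq : q e = true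
      · rw [if_neg hp, if_pos hq, if_pos (show (p e || q e) = true by simp [hq])]
        exact minp_fresh _ _ _ _
      · rw [if_neg hp, if_neg hq,
            if_neg (show ¬ (p e || q e) = true by simp [Bool.not_eq_true] at hp hq; simp [hp, hq])]
        exact ih (k + 1)

-- folding minp over an index list accumulates the first match of the any-predicate
theorem foldl_minp_firstG (pred : Int → String × String → Bool)
    (l : List (String × String)) (is : List Int) :
    is.foldl (fun b i => minp b (firstG (pred i) 0 l)) none =
      firstG (fun e => is.any (fun i => pred i e)) 0 l := by
  induction is using List.reverseRecOn with
  | nil => simp [firstG_false]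
  | append_singleton is i ih =>
    rw [List.foldl_append]
    simp only [List.foldl_cons, List.foldl_nil, ih, minp_firstG_firstG]
    congr 1
    funext e
    simp

-- dropping the priority from the first match gives the first output
theorem map_snd_firstG (pred : String × String → Bool) (l : List (String × String)) (k : Nat) :
    (firstG pred k l).map (·.2) = firstOut pred l := by
  induction l generalizing k with
  | nil => rfl
  | cons e rest ih =>
    simp only [firstG, firstOut]
    split <;> simp [ih]

-- firstG agrees on pointwise-equal predicates
theorem firstG_congr (p q : String × String → Bool) (h : ∀ e, p e = q e)
    (l : List (String × String)) (k : Nat) : firstG p k l = firstG q k l := by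
  induction l generalizing k with
  | nil => rfl
  | cons e rest ih => simp only [firstG, h, ih]

-- a keyword occurs somewhere in name iff it prefixes some tail name[i:], i ≤ len
theorem any_startswith_iff (name kw : String) :
    ((PySem.List.pyRange 0 (PySem.Str.len name + 1) 1).any
      (fun i => pyStartswithFrom name kw i)) =
    PySem.Str.isIn kw name := by
  simp only [pyStartswithFrom]
  rcases Bool.eq_false_or_eq_true (PySem.Str.isIn kw name) with h | h <;> rw [h]
  · rw [List.any_eq_true]
    rw [PySem.Str.isIn_eq] at h
    obtain ⟨j, hj⟩ := (PySem.Chars.exists_prefix_drop_iff_isIn kw.toList name.toList).mpr h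
    refine ⟨(min j name.toList.length : Nat), ?_, ?_⟩
    · rw [PySem.List.mem_pyRange_one, PySem.Str.len_eq]
      constructor
      · exact Int.natCast_nonneg _
      · have : min j name.toList.length ≤ name.toList.length := Nat.min_le_right _ _
        omega
    · rw [PySem.Str.startswith_eq, PySem.Chars.startswith_iff, PySem.Str.toList_slice,
          PySem.Chars.slice_eq_listSlice, PySem.List.slice_from_natCast]
      by_cases hle : j ≤ name.toList.length
      · rwa [Nat.min_eq_left hle]
      · have hnil : name.toList.drop j = [] := List.drop_eq_nil_of_le (by omega)
        rw [hnil] at hj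
        rw [Nat.min_eq_right (by omega), List.drop_length]
        exact hj
  · rw [List.any_eq_false]
    intro i hi
    rw [PySem.List.mem_pyRange_one] at hi
    simp only [Bool.not_eq_true]
    by_contra hsw
    rw [Bool.not_eq_false, PySem.Str.startswith_eq, PySem.Chars.startswith_iff] at hsw
    rw [PySem.Str.toList_slice, PySem.Chars.slice_eq_listSlice,
        PySem.List.slice_from _ hi.1] at hsw
    have : PySem.Str.isIn kw name = true := by
      rw [PySem.Str.isIn_eq]
      exact (PySem.Chars.exists_prefix_drop_iff_isIn _ _).mp ⟨_, hsw⟩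
    rw [h] at this; exact Bool.false_ne_true this
  -- exact on ASCII and beyond: uses only PySem's own startswith/slice/isIn semantics

-- B computes the first output (by table priority) whose keyword occurs in the name
theorem altB_eq_firstOut (label : String) :
    normalise_label_alt label =
      (firstOut (fun e => PySem.Str.isIn e.1 (PySem.Str.lower label)) flatTable) := by
  unfold normalise_label_alt
  simp only
  have hfun : (fun (best : Option (Nat × String)) (i : Int) =>
      (innerB (PySem.Str.lower label) i (best, 0) flatTable).1) =
      (fun (best : Option (Nat × String)) (i : Int) => minp best (firstG
        (fun e => pyStartswithFrom (PySem.Str.lower label) e.1 i) 0 flatTable)) :=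
    funext fun b => funext fun i => innerB_eq_minp _ _ _ _ _
  rw [hfun,
      foldl_minp_firstG (fun i e => pyStartswithFrom (PySem.Str.lower label) e.1 i) flatTable,
      firstG_congr (fun e => (PySem.List.pyRange 0 (PySem.Str.len (PySem.Str.lower label) + 1) 1).any
          (fun i => pyStartswithFrom (PySem.Str.lower label) e.1 i))
        (fun e => PySem.Str.isIn e.1 (PySem.Str.lower label))
        (fun e => any_startswith_iff (PySem.Str.lower label) e.1)]
  rw [← map_snd_firstG _ flatTable 0]
  cases firstG (fun e => PySem.Str.isIn e.1 (PySem.Str.lower label)) 0 flatTable <;> rfl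

-- one gesture's inner loop of A equals the first-output scan of its flattened block
theorem innerA_eq_firstOut (name tl : String) (kws : List String) (rest : List (String × String)) :
    (match innerA name tl kws with
     | some r => some r
     | none => firstOut (fun e => PySem.Str.isIn e.1 name) rest) =
    firstOut (fun e => PySem.Str.isIn e.1 name)
      (kws.map (fun kw => (kw, if tl ∈ foldedList then "none" else tl)) ++ rest) := by
  induction kws with
  | nil => rfl
  | cons kw t ih =>
    simp only [innerA, List.map_cons, List.cons_append, firstOut]
    split_ifs <;> simp_all

theorem outerA_eq_firstOut (name : String) (l : List (String × List String)) :
    outerA name l = firstOut (fun e => PySem.Str.isIn e.1 name)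
      (l.flatMap (fun p => p.2.map (fun kw => (kw, if p.1 ∈ foldedList then "none" else p.1)))) := by
  induction l with
  | nil => rfl
  | cons p rest ih =>
    obtain ⟨tl, kws⟩ := p
    simp only [outerA, List.flatMap_cons, ih]
    exact innerA_eq_firstOut name tl kws _

-- A's nested table, flattened, is exactly B's literal priority table
theorem flatten_eq_flatTable :
    gestureKeywords.flatMap (fun p => p.2.map (fun kw => (kw, if p.1 ∈ foldedList then "none" else p.1))) =
    flatTable := by decide

-- ===== VERDICT (by name: the statement is the Claim_ definition above) =====
theorem normalise_label_spec : Claim_equal_normalise_label := by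
  intro label _
  unfold Spec_normalise_label normalise_label
  rw [outerA_eq_firstOut, flatten_eq_flatTable, altB_eq_firstOut]
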